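-- pv_equiv track=rewrite | github.com/KorzikAlex/piaa_repo | LR4/src/modules/kmp.py | find_cyclic_shift
-- ===== SOURCE A (Python) =====
-- def prefix_func(text: str) -> list[int]:
--     """
--     Функция для поиска префикс-функции строки (векторный формат)
--     :param text:
--     :return:
--     """
--     n: int = len(text)
--     pi: list[int] = [0] * n
--     for i in range(1, n):
--         j: int = pi[i - 1]
--         while (j > 0) and (text[j] != text[i]):
--             j: int = pi[j - 1]
--         if text[i] == text[j]:
--             j += 1
--         pi[i]: int = j
--     return pi
--
-- def find_cyclic_shift(text: str, sub_text: str) -> int: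
--     """
--     Функция для поиска циклического сдвига строки
--     :param text:
--     :param sub_text:
--     :return:
--     """
--     if len(text) == 0 or len(sub_text) == 0:
--         return -1
--     j: int = 0
--     pi: list[int] = prefix_func(sub_text)
--     for i in range(2 * len(text)):
--         idx: int = i % len(text)
--         while (j > 0) and (text[idx] != sub_text[j]):
--             j: int = pi[j - 1]
--         if text[idx] == sub_text[j]:
--             j += 1
--         if j == len(sub_text):
--             return i - j + 1
--     return -1
-- ===== SOURCE B (Python) =====
-- def find_cyclic_shift(text: str, sub_text: str) -> int:
--     if not text or not sub_text:
--         return -1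
--     return (text + text).find(sub_text)
-- ===== Notes on version B (the rewrite author's own statement) =====
-- stated objective: idiomatic
-- what changed: Replaced the hand-written KMP (prefix function + wrap-around scan over 2*len(text) positions) by the standard-library one-liner (text+text).find(sub_text), keeping the empty-input guard that returns -1.
import Mathlib
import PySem

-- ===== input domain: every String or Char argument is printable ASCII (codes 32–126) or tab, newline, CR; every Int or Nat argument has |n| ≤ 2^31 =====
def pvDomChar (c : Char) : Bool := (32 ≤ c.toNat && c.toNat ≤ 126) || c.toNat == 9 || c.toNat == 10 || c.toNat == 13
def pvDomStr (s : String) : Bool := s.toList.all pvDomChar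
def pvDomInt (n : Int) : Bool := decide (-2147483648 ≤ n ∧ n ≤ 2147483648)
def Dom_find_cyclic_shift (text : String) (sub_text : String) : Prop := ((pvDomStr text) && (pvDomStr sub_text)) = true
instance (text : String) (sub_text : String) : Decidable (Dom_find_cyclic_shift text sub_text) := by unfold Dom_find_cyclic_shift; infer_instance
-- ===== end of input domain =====

-- B replaces the hand-written KMP by the idiomatic `(text+text).find(sub_text)` with the same empty-input guard.

-- ===== PORT A =====
-- `while (j > 0) and (X != c): j = pi[j - 1]` — shared shape of the while-loops of
-- prefix_func (X = text[j] vs c = text[i]) and find_cyclic_shift (X = sub_text[j] vs c = text[idx]).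
-- The fuel argument only makes the loop total; with fuel = initial j it performs exactly
-- Python's iterations, because each step strictly decreases j (pi[j-1] ≤ j-1, proved below).
-- All indexings are in range on every Python execution, so `getD` with a dummy default is exact.
def kmpFall (p : List Char) (pi : List Nat) (c : Char) : Nat → Nat → Nat
  | 0, j => j
  | fuel + 1, j => if 0 < j ∧ p.getD j ' ' ≠ c then kmpFall p pi c fuel (pi.getD (j - 1) 0) else j

-- prefix_func: pi = [0]*n; for i in range(1, n): …
def prefixFunc (p : List Char) : List Nat :=
  (List.range' 1 (p.length - 1)).foldl
    (fun pi i =>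
      let j0 := pi.getD (i - 1) 0
      let j1 := kmpFall p pi (p.getD i ' ') j0 j0
      let j2 := if p.getD i ' ' = p.getD j1 ' ' then j1 + 1 else j1
      pi.set i j2)
    (List.replicate p.length 0)

-- for i in range(2 * len(text)): …, with early return; `rem` counts the remaining iterations.
def kmpGo (t p : List Char) (pi : List Nat) : Nat → Nat → Nat → Int
  | _, _, 0 => -1
  | i, j, rem + 1 =>
    let idx := i % t.length
    let j1 := kmpFall p pi (t.getD idx ' ') j j
    let j2 := if t.getD idx ' ' = p.getD j1 ' ' then j1 + 1 else j1
    if j2 = p.length then (i : Int) - (j2 : Int) + 1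
    else kmpGo t p pi (i + 1) j2 rem

def find_cyclic_shift (text : String) (sub_text : String) : Int :=
  let t := text.toList
  let p := sub_text.toList
  if t.length = 0 ∨ p.length = 0 then -1
  else kmpGo t p (prefixFunc p) 0 0 (2 * t.length)

-- ===== PORT B =====
def find_cyclic_shift_alt (text : String) (sub_text : String) : Int :=
  if text.toList = [] ∨ sub_text.toList = [] then -1
  else PySem.Str.find (text ++ text) sub_text

-- ===== PRECONDITION & SPEC =====
def Spec_find_cyclic_shift (text : String) (sub_text : String) (out : Int) : Prop := out = find_cyclic_shift_alt text sub_text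
instance (text : String) (sub_text : String) (out : Int) : Decidable (Spec_find_cyclic_shift text sub_text out) := by unfold Spec_find_cyclic_shift; infer_instance

-- ===== CLAIM (what is proved, stated in full; the proofs are below) =====
def Claim_equal_find_cyclic_shift : Prop := ∀ (text : String) (sub_text : String), Dom_find_cyclic_shift text sub_text → Spec_find_cyclic_shift text sub_text (find_cyclic_shift text sub_text)

-- ===== LEMMAS AND PROOFS =====

-- longest k ≤ b with p.take k a suffix of u
def kmpG (p : List Char) (b : Nat) (u : List Char) : Nat :=
  Nat.findGreatest (fun k => p.take k <:+ u) b

lemma kmpG_le (p : List Char) (b : Nat) (u : List Char) : kmpG p b u ≤ b :=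
  Nat.findGreatest_le b

lemma kmpG_suffix (p : List Char) (b : Nat) (u : List Char) : p.take (kmpG p b u) <:+ u := by
  exact Nat.findGreatest_spec (P := fun k => p.take k <:+ u) (Nat.zero_le b) (by simp)

lemma le_kmpG (p : List Char) (b : Nat) (u : List Char) (k : Nat) (hk : k ≤ b)
    (h : p.take k <:+ u) : k ≤ kmpG p b u :=
  Nat.le_findGreatest hk h

lemma suffix_append_singleton {x u : List Char} (c : Char) (h : x <:+ u) :
    x ++ [c] <:+ u ++ [c] := by
  obtain ⟨w, hw⟩ := h
  exact ⟨w, by rw [← hw, List.append_assoc]⟩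

lemma suffix_append_singleton_inv {x y : List Char} {a c : Char}
    (h : x ++ [a] <:+ y ++ [c]) : a = c ∧ x <:+ y := by
  obtain ⟨w, hw⟩ := h
  have hac : a = c := by
    have := congrArg List.getLast? hw; simp at this; exact this
  subst hac
  rw [← List.append_assoc] at hw
  exact ⟨rfl, ⟨w, List.append_cancel_right hw⟩⟩

lemma kmpFall_spec (p : List Char) (pi : List Nat) (c : Char) (u : List Char) :
    ∀ fuel j, j ≤ fuel →
    (∀ t, 0 < t → t ≤ j → pi.getD (t-1) 0 = kmpG p (t-1) (p.take t)) →
    p.take j <:+ u →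
    kmpFall p pi c fuel j ≤ j ∧ p.take (kmpFall p pi c fuel j) <:+ u ∧
      (kmpFall p pi c fuel j = 0 ∨ p.getD (kmpFall p pi c fuel j) ' ' = c) ∧
      ∀ k, k ≤ j → p.take k <:+ u → (k = 0 ∨ p.getD k ' ' = c) →
        k ≤ kmpFall p pi c fuel j := by
  intro fuel
  induction fuel with
  | zero =>
    intro j hj hpi hsuf
    interval_cases j
    refine ⟨le_refl _, by simp [kmpFall], Or.inl rfl, ?_⟩
    intro k hk _ _; simpa [kmpFall] using hk
  | succ fuel ih =>
    intro j hj hpi hsuf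
    by_cases hcond : 0 < j ∧ p.getD j ' ' ≠ c
    · have hstep : kmpFall p pi c (fuel + 1) j = kmpFall p pi c fuel (pi.getD (j-1) 0) := by
        rw [kmpFall, if_pos hcond]
      have hpij : pi.getD (j-1) 0 = kmpG p (j-1) (p.take j) := hpi j hcond.1 (le_refl _)
      set j' := pi.getD (j-1) 0 with hj'
      have hj'le : j' ≤ j - 1 := hpij ▸ kmpG_le p (j-1) (p.take j)
      have hj'fuel : j' ≤ fuel := by omega
      have hsuf' : p.take j' <:+ u :=
        (hpij ▸ kmpG_suffix p (j-1) (p.take j)).trans hsuf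
      have hpi' : ∀ t, 0 < t → t ≤ j' → pi.getD (t-1) 0 = kmpG p (t-1) (p.take t) := by
        intro t ht htle; exact hpi t ht (by omega)
      obtain ⟨h1, h2, h3, h4⟩ := ih j' hj'fuel hpi' hsuf'
      rw [hstep]
      refine ⟨by omega, h2, h3, ?_⟩
      intro k hk hksuf hkdisj
      have hkj : k < j := by
        rcases Nat.lt_or_ge k j with h | h
        · exact h
        · exfalso
          have : k = j := le_antisymm hk h
          subst this
          rcases hkdisj with h0 | hc
          · omega
          · exact hcond.2 hc
      have hktake : p.take k <:+ p.take j := by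
        apply List.suffix_of_suffix_length_le hksuf hsuf
        simp [List.length_take]; omega
      have : k ≤ kmpG p (j-1) (p.take j) := le_kmpG _ _ _ _ (by omega) hktake
      exact h4 k (by omega) hksuf hkdisj
    · have hstep : kmpFall p pi c (fuel + 1) j = j := by
        rw [kmpFall, if_neg hcond]
      rw [hstep]
      refine ⟨le_refl _, hsuf, ?_, fun k hk _ _ => hk⟩
      rcases Nat.eq_zero_or_pos j with h0 | hpos
      · exact Or.inl h0
      · exact Or.inr (by rcases Decidable.not_and_iff_not_or_not.mp hcond with h | h; exacts [absurd hpos h, Decidable.not_not.mp h])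

lemma kmpStep_spec (p : List Char) (pi : List Nat) (u : List Char) (c : Char)
    (b b' j : Nat) (hj : j = kmpG p b u) (hjm : j < p.length)
    (hb' : b' ≤ b + 1) (hjb' : j + 1 ≤ b') (hb'm : b' ≤ p.length)
    (hpi : ∀ t, 0 < t → t ≤ j → pi.getD (t-1) 0 = kmpG p (t-1) (p.take t)) :
    (if c = p.getD (kmpFall p pi c j j) ' ' then kmpFall p pi c j j + 1
     else kmpFall p pi c j j) = kmpG p b' (u ++ [c]) := by
  have hsuf : p.take j <:+ u := hj ▸ kmpG_suffix p b u
  obtain ⟨h1, h2, h3, h4⟩ := kmpFall_spec p pi c u j j (le_refl _) hpi hsuf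
  set r := kmpFall p pi c j j with hr
  have hrm : r < p.length := lt_of_le_of_lt h1 hjm
  have key : ∀ n, 0 < n → n ≤ b' → p.take n <:+ u ++ [c] →
      p.getD (n-1) ' ' = c ∧ n - 1 ≤ r := by
    intro n hn hnb' hnsuf
    have hn1m : n - 1 < p.length := by omega
    have hn11 : n - 1 + 1 = n := by omega
    have htake := List.take_succ_eq_append_getElem hn1m
    rw [hn11] at htake
    rw [htake] at hnsuf
    obtain ⟨hceq, hsufn⟩ := suffix_append_singleton_inv hnsuf
    have hgd : p.getD (n-1) ' ' = c := by rw [List.getD_eq_getElem _ _ hn1m]; exact hceq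
    have hnj : n - 1 ≤ j := hj ▸ le_kmpG p b u (n-1) (by omega) hsufn
    exact ⟨hgd, h4 (n-1) hnj hsufn (Or.inr hgd)⟩
  by_cases hc : c = p.getD r ' '
  · rw [if_pos hc]
    symm
    rw [kmpG, Nat.findGreatest_eq_iff]
    refine ⟨by omega, ?_, ?_⟩
    · intro _
      have : p.take (r+1) = p.take r ++ [p[r]] := List.take_succ_eq_append_getElem hrm
      rw [this]
      have : p[r] = c := by rw [← List.getD_eq_getElem p ' ' hrm]; exact hc.symm
      rw [this]
      exact suffix_append_singleton c h2
    · intro n hgt hnb' hnsuf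
      have := key n (by omega) hnb' hnsuf
      omega
  · rw [if_neg hc]
    have hr0 : r = 0 := by
      rcases h3 with h | h
      · exact h
      · exact absurd h.symm hc
    rw [hr0]
    symm
    rw [kmpG]
    apply Nat.findGreatest_eq_zero_iff.mpr
    intro n hn hnb' hnsuf
    obtain ⟨hgd, hle⟩ := key n hn hnb' hnsuf
    have hn1 : n = 1 := by omega
    subst hn1
    simp at hgd
    rw [hr0] at hc
    exact hc hgd.symm

-- proof-side restatement of prefixFunc's loop, cut off after k iterations
def piLoop (p : List Char) (k : Nat) : List Nat :=
  (List.range' 1 k).foldl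
    (fun pi i =>
      let j0 := pi.getD (i - 1) 0
      let j1 := kmpFall p pi (p.getD i ' ') j0 j0
      let j2 := if p.getD i ' ' = p.getD j1 ' ' then j1 + 1 else j1
      pi.set i j2)
    (List.replicate p.length 0)

lemma prefixFunc_eq_piLoop (p : List Char) : prefixFunc p = piLoop p (p.length - 1) := rfl

lemma getD_set_eq (L : List Nat) (i t : Nat) (v : Nat) :
    (L.set i v).getD t 0 = if t = i ∧ i < L.length then v else L.getD t 0 := by
  by_cases h : t = i ∧ i < L.length
  · obtain ⟨rfl, hlt⟩ := h
    simp [List.getD_eq_getElem?_getD, hlt]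
  · rcases Decidable.not_and_iff_not_or_not.mp h with h1 | h2
    · simp [List.getD_eq_getElem?_getD, Ne.symm h1, h1]
    · have : L.set i v = L := List.set_eq_of_length_le (by omega)
      rw [this, if_neg h]

lemma piLoop_spec (p : List Char) : ∀ k, k ≤ p.length - 1 →
    (piLoop p k).length = p.length ∧
    ∀ t, t ≤ k → (piLoop p k).getD t 0 = kmpG p t (p.take (t+1)) := by
  intro k
  induction k with
  | zero =>
    intro _
    constructor
    · simp [piLoop]
    · intro t ht
      interval_cases t
      have : (piLoop p 0).getD 0 0 = 0 := by
        rcases p with _ | ⟨a, q⟩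
        · rfl
        · simp [piLoop, List.getD]
      rw [this, kmpG]
      rfl
  | succ k ih =>
    intro hk
    have hk' : k ≤ p.length - 1 := by omega
    obtain ⟨ihlen, ihval⟩ := ih hk'
    have hrange : List.range' 1 (k+1) = List.range' 1 k ++ [1 + k] := by simpa using List.range'_concat (s:=1) (step:=1) (n:=k)
    have hone : 1 + k = k + 1 := by omega
    have hstep : piLoop p (k+1) =
        (let j0 := (piLoop p k).getD k 0
         let j1 := kmpFall p (piLoop p k) (p.getD (k+1) ' ') j0 j0
         let j2 := if p.getD (k+1) ' ' = p.getD j1 ' ' then j1 + 1 else j1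
         (piLoop p k).set (k+1) j2) := by
      rw [piLoop, hrange, hone, List.foldl_append]
      rfl
    have hkm : k + 1 < p.length := by omega
    have hj0 : (piLoop p k).getD k 0 = kmpG p k (p.take (k+1)) := ihval k (le_refl _)
    have hpi : ∀ t, 0 < t → t ≤ (piLoop p k).getD k 0 →
        (piLoop p k).getD (t-1) 0 = kmpG p (t-1) (p.take t) := by
      intro t ht htle
      have h1 : (piLoop p k).getD k 0 ≤ k := hj0 ▸ kmpG_le p k (p.take (k+1))
      have := ihval (t-1) (by omega)
      rwa [Nat.sub_add_cancel ht] at this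
    have hj0le : (piLoop p k).getD k 0 ≤ k := hj0 ▸ kmpG_le p k (p.take (k+1))
    have hmain := kmpStep_spec p (piLoop p k) (p.take (k+1)) (p.getD (k+1) ' ')
      k (k+1) ((piLoop p k).getD k 0) hj0 (by omega) (le_refl _) (by omega) (by omega) hpi
    have htk : p.take (k+1) ++ [p.getD (k+1) ' '] = p.take (k+2) := by
      rw [List.getD_eq_getElem p ' ' hkm]
      exact (List.take_succ_eq_append_getElem hkm).symm
    rw [htk] at hmain
    constructor
    · rw [hstep]; simpa using ihlen
    · intro t ht
      rw [hstep]
      simp only []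
      rw [getD_set_eq]
      by_cases hti : t = k + 1
      · subst hti
        rw [if_pos ⟨rfl, by omega⟩]
        exact hmain
      · rw [if_neg (by tauto)]
        exact ihval t (by omega)

lemma occ_take_drop (d p : List Char) (hp : p ≠ []) (s : Nat) :
    p <+: d.drop s ↔ s + p.length ≤ d.length ∧ p <:+ d.take (s + p.length) := by
  constructor
  · intro h
    have hs : s ≤ d.length := by
      by_contra hgt
      have : d.drop s = [] := List.drop_eq_nil_iff.mpr (by omega)
      rw [this] at h
      exact hp (List.prefix_nil.mp h)
    have hlen : p.length ≤ d.length - s := by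
      have := h.length_le
      simpa using this
    refine ⟨by omega, ?_⟩
    have htadd : d.take (s + p.length) = d.take s ++ (d.drop s).take p.length :=
      List.take_add
    have hpt : (d.drop s).take p.length = p := (List.prefix_iff_eq_take.mp h).symm
    rw [htadd, hpt]
    exact ⟨d.take s, rfl⟩
  · rintro ⟨hle, w, hw⟩
    have hlw : w.length = s := by
      have := congrArg List.length hw
      simp [List.length_take] at this
      omega
    set r := d.drop (s + p.length) with hr
    have hd : d = w ++ p ++ r := by
      conv_lhs => rw [← List.take_append_drop (s + p.length) d]
      rw [← hw]
    have hds : d.drop s = p ++ r := by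
      conv_lhs => rw [hd]
      rw [List.append_assoc, ← hlw]
      exact List.drop_left
    exact ⟨r, hds.symm⟩

lemma find_eq_of_first (d p : List Char) (s : Nat) (h1 : p <+: d.drop s)
    (h2 : ∀ s', s' < s → ¬ p <+: d.drop s') : PySem.Chars.find d p = (s : Int) := by
  have hnn : 0 ≤ PySem.Chars.find d p :=
    (PySem.Chars.find_nonneg_iff d p).mpr
      ((PySem.Chars.isIn_iff_infix p d).mp ((PySem.Chars.exists_prefix_drop_iff_isIn p d).mp ⟨s, h1⟩))
  obtain ⟨hpref, hmin⟩ := PySem.Chars.find_spec hnn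
  have hfs : (PySem.Chars.find d p).toNat = s := by
    rcases lt_trichotomy (PySem.Chars.find d p).toNat s with h | h | h
    · exact absurd hpref (h2 _ h)
    · exact h
    · exact absurd h1 (hmin s h)
  omega

lemma double_getD (t : List Char) (ht : t ≠ []) (i : Nat) (hi : i < 2 * t.length) :
    (t ++ t).getD i ' ' = t.getD (i % t.length) ' ' := by
  have hn : 0 < t.length := List.length_pos_iff.mpr ht
  have him : i % t.length < t.length := Nat.mod_lt i hn
  have hid : i < (t ++ t).length := by simp; omega
  rw [List.getD_eq_getElem _ ' ' hid, List.getD_eq_getElem _ ' ' him]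
  by_cases h : i < t.length
  · rw [List.getElem_append_left h]
    congr 1
    exact (Nat.mod_eq_of_lt h).symm
  · rw [List.getElem_append_right (by omega)]
    congr 1
    have : i % t.length = i - t.length := by
      rw [Nat.mod_eq_sub_mod (by omega), Nat.mod_eq_of_lt (by omega)]
    omega

lemma kmpGo_spec (t p : List Char) (pi : List Nat) (hp : p ≠ []) (ht : t ≠ [])
    (hpi : ∀ i, i < p.length → pi.getD i 0 = kmpG p i (p.take (i+1))) :
    ∀ rem i j, i + rem = 2 * t.length →
    j = kmpG p p.length ((t ++ t).take i) →
    (∀ e, e ≤ i → ¬ p <:+ (t ++ t).take e) →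
    kmpGo t p pi i j rem = PySem.Chars.find (t ++ t) p := by
  have hdl : (t ++ t).length = 2 * t.length := by simp; omega
  have hm : 0 < p.length := List.length_pos_iff.mpr hp
  intro rem
  induction rem with
  | zero =>
    intro i j hrem hj hno
    rw [kmpGo]
    symm
    rw [PySem.Chars.find_eq_neg_one_iff]
    intro hinf
    obtain ⟨s, hs⟩ := (PySem.Chars.exists_prefix_drop_iff_isIn p (t++t)).mpr
      ((PySem.Chars.isIn_iff_infix p (t++t)).mpr hinf)
    obtain ⟨hle, hsuf⟩ := (occ_take_drop (t++t) p hp s).mp hs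
    exact hno (s + p.length) (by omega) hsuf
  | succ rem ih =>
    intro i j hrem hj hno
    have hi2 : i < 2 * t.length := by omega
    have hjm : j < p.length := by
      have hjle : j ≤ p.length := hj ▸ kmpG_le p p.length ((t++t).take i)
      rcases Nat.lt_or_ge j p.length with h | h
      · exact h
      · exfalso
        have hje : j = p.length := by omega
        have := hj ▸ kmpG_suffix p p.length ((t++t).take i)
        rw [hje, List.take_length] at this
        exact hno i (le_refl _) this
    have hc : t.getD (i % t.length) ' ' = (t ++ t).getD i ' ' :=
      (double_getD t ht i hi2).symm
    have hpi' : ∀ t', 0 < t' → t' ≤ j → pi.getD (t'-1) 0 = kmpG p (t'-1) (p.take t') := by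
      intro t' ht' htle
      have := hpi (t'-1) (by omega)
      rwa [Nat.sub_add_cancel ht'] at this
    have hstep := kmpStep_spec p pi ((t++t).take i) ((t++t).getD i ' ')
      p.length p.length j hj hjm (by omega) (by omega) (le_refl _) hpi'
    have hid : i < (t ++ t).length := by omega
    have htk : (t++t).take i ++ [(t++t).getD i ' '] = (t++t).take (i+1) := by
      rw [List.getD_eq_getElem _ ' ' hid]
      exact (List.take_succ_eq_append_getElem hid).symm
    rw [htk] at hstep
    rw [kmpGo]
    simp only [hc]
    set j2 := if (t++t).getD i ' ' = p.getD (kmpFall p pi ((t++t).getD i ' ') j j) ' '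
      then kmpFall p pi ((t++t).getD i ' ') j j + 1
      else kmpFall p pi ((t++t).getD i ' ') j j with hj2def
    have hj2 : j2 = kmpG p p.length ((t++t).take (i+1)) := by
      rw [hj2def, ← hstep]
    by_cases hfull : j2 = p.length
    · rw [if_pos hfull]
      have hocc : p <:+ (t++t).take (i+1) := by
        have := hj2 ▸ kmpG_suffix p p.length ((t++t).take (i+1))
        rwa [hfull, List.take_length] at this
      have hlen1 : p.length ≤ i + 1 := by
        have := hocc.length_le
        simp [List.length_take] at this
        omega
      have hfind : PySem.Chars.find (t++t) p = ((i + 1 - p.length : Nat) : Int) := by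
        apply find_eq_of_first
        · apply (occ_take_drop (t++t) p hp _).mpr
          constructor
          · omega
          · have : i + 1 - p.length + p.length = i + 1 := by omega
            rw [this]
            exact hocc
        · intro s' hs' hpre
          obtain ⟨hle', hsuf'⟩ := (occ_take_drop (t++t) p hp s').mp hpre
          exact hno (s' + p.length) (by omega) hsuf'
      rw [hfind]
      rw [hfull]
      omega
    · rw [if_neg hfull]
      apply ih (i+1) j2 (by omega) hj2
      intro e he
      rcases Nat.lt_or_ge e (i+1) with h | h
      · exact hno e (by omega)
      · have he1 : e = i + 1 := by omega
        subst he1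
        intro hsuf
        apply hfull
        have hup : p.length ≤ kmpG p p.length ((t++t).take (i+1)) := by
          apply le_kmpG p p.length _ p.length (le_refl _)
          rw [List.take_length]
          exact hsuf
        have := kmpG_le p p.length ((t++t).take (i+1))
        omega

lemma kmp_eq_find (t p : List Char) (ht : t ≠ []) (hp : p ≠ []) :
    kmpGo t p (prefixFunc p) 0 0 (2 * t.length) = PySem.Chars.find (t ++ t) p := by
  have hm : 0 < p.length := List.length_pos_iff.mpr hp
  have hpi : ∀ i, i < p.length → (prefixFunc p).getD i 0 = kmpG p i (p.take (i+1)) := by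
    intro i hi
    rw [prefixFunc_eq_piLoop]
    exact (piLoop_spec p (p.length - 1) (le_refl _)).2 i (by omega)
  apply kmpGo_spec t p (prefixFunc p) hp ht hpi (2 * t.length) 0 0 (by omega)
  · symm
    rw [kmpG]
    apply Nat.findGreatest_eq_zero_iff.mpr
    intro n hn hnb hsuf
    simp only [List.take_zero] at hsuf
    have := List.suffix_nil.mp hsuf
    rcases List.take_eq_nil_iff.mp this with h | h
    · omega
    · exact hp h
  · intro e he hsuf
    interval_cases e
    simp only [List.take_zero] at hsuf
    exact hp (List.suffix_nil.mp hsuf)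

lemma find_cyclic_shift_eq (text sub_text : String) :
    find_cyclic_shift text sub_text = find_cyclic_shift_alt text sub_text := by
  unfold find_cyclic_shift find_cyclic_shift_alt
  by_cases h : text.toList = [] ∨ sub_text.toList = []
  · rw [if_pos h, if_pos (by rcases h with h | h <;> simp [h])]
  · rw [not_or] at h
    rw [if_neg (by simp only [List.length_eq_zero_iff]; tauto),
        if_neg (by tauto)]
    rw [kmp_eq_find _ _ h.1 h.2]
    simp [PySem.Str.find]

-- ===== VERDICT (by name: the statement is the Claim_ definition above) =====
theorem find_cyclic_shift_spec : Claim_equal_find_cyclic_shift := by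
  intro text sub_text _
  unfold Spec_find_cyclic_shift
  exact find_cyclic_shift_eq text sub_text
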